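-- pv_equiv track=rewrite | github.com/harelgam/search-algoritems | q2.py | transpose_and_fill
-- ===== SOURCE A (Python) =====
-- def transpose_and_fill(final_paths):
--     # Find the maximum length of the paths
--     max_length = max(len(path) for path in final_paths)
--
--     # Extend each path to the maximum length by repeating the last element
--     extended_paths = [
--         path + [path[-1]] * (max_length - len(path))
--         for path in final_paths
--     ]
--
--     # Transpose the extended matrix
--     transposed_paths = list(map(list, zip(*extended_paths)))
--
--     return transposed_paths
-- ===== SOURCE B (Python) =====
-- def transpose_and_fill(final_paths):
--     max_length = max(len(p) for p in final_paths)
--     return [[p[i] if i < len(p) else p[-1] for p in final_paths]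
--             for i in range(max_length)]
-- ===== Notes on version B (the rewrite author's own statement) =====
-- stated objective: simpler
-- what changed: B builds the result directly column by column with a clamped source index (p[i] if i < len(p) else p[-1]), eliminating A's intermediate padded matrix and the zip transpose.
import Mathlib
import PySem

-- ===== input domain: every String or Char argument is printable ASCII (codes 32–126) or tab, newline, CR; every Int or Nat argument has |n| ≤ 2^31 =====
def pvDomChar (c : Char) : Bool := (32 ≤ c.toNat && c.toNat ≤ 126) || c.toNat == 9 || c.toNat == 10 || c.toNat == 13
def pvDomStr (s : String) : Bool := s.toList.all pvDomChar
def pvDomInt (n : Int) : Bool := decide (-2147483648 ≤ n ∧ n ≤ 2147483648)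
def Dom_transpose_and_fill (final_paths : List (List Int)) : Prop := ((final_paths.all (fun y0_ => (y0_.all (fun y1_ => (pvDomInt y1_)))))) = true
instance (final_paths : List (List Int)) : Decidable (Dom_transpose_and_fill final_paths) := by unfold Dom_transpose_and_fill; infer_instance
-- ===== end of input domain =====

-- B builds the result column by column with a clamped source index, eliminating A's
-- padded intermediate matrix and the zip transpose (objective: simpler).

-- ===== PORT A =====
-- Python's zip(*rows) truncated to the shortest row, read off by index
-- (exact: every index i < min length is in range for every row, so getD's default is never used).
def pyZipStar (rows : List (List Int)) : List (List Int) :=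
  let m := ((rows.map List.length).min?).getD 0
  (List.range m).map (fun i => rows.map (fun r => r.getD i 0))

def transpose_and_fill (final_paths : List (List Int)) : List (List Int) :=
  let max_length := ((final_paths.map List.length).max?).getD 0
  let extended_paths := final_paths.map (fun path =>
    path ++ List.replicate (max_length - path.length) ((PySem.List.pyGet? path (-1)).getD 0))
  pyZipStar extended_paths

-- ===== PORT B =====
def transpose_and_fill_alt (final_paths : List (List Int)) : List (List Int) :=
  let max_length := ((final_paths.map List.length).max?).getD 0
  (List.range max_length).map (fun i =>
    final_paths.map (fun p =>
      if i < p.length then p.getD i 0 else (PySem.List.pyGet? p (-1)).getD 0))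

-- ===== PRECONDITION & SPEC =====
-- Pre_ excludes the empty input (max() raises ValueError) and inputs containing an empty
-- path (A evaluates path[-1] eagerly, raising IndexError).
def Pre_transpose_and_fill (final_paths : List (List Int)) : Prop :=
  final_paths ≠ [] ∧ ∀ p ∈ final_paths, p ≠ []
instance (final_paths : List (List Int)) : Decidable (Pre_transpose_and_fill final_paths) := by
  unfold Pre_transpose_and_fill; infer_instance

def pvWitness_transpose_and_fill : List (List Int) := [[1, 2, 3], [4], [5, 6]]

def Spec_transpose_and_fill (final_paths : List (List Int)) (out : List (List Int)) : Prop :=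
  out = transpose_and_fill_alt final_paths
instance (final_paths : List (List Int)) (out : List (List Int)) : Decidable (Spec_transpose_and_fill final_paths out) := by unfold Spec_transpose_and_fill; infer_instance

-- ===== CLAIM (what is proved, stated in full; the proofs are below) =====
def Claim_equal_transpose_and_fill : Prop := ∀ (final_paths : List (List Int)), Dom_transpose_and_fill final_paths → Pre_transpose_and_fill final_paths → Spec_transpose_and_fill final_paths (transpose_and_fill final_paths)

-- ===== LEMMAS AND PROOFS =====

-- every length is ≤ the max? of the lengths (defaulted)
theorem len_le_maxLen (fp : List (List Int)) (p : List Int) (hp : p ∈ fp) :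
    p.length ≤ ((fp.map List.length).max?).getD 0 := by
  have hmem : p.length ∈ fp.map List.length := List.mem_map_of_mem hp
  cases hmax : (fp.map List.length).max? with
  | none => simp [List.max?_eq_none_iff] at hmax; simp [hmax] at hmem
  | some m =>
    have := (List.max?_eq_some_iff.mp hmax).2 p.length hmem
    simpa [hmax] using this

-- the padded row has length exactly M when p.length ≤ M
theorem ext_len (p : List Int) (M : Nat) (h : p.length ≤ M) (x : Int) :
    (p ++ List.replicate (M - p.length) x).length = M := by
  simp; omega

-- indexing the padded row = clamped indexing of the original row
theorem ext_getD (p : List Int) (M i : Nat) (hlen : p.length ≤ M) (hi : i < M) (x : Int) :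
    (p ++ List.replicate (M - p.length) x).getD i 0 =
      if i < p.length then p.getD i 0 else x := by
  by_cases h : i < p.length
  · simp [h, List.getD, List.getElem?_append_left h]
  · have h1 : i - p.length < M - p.length := by omega
    simp [h, List.getD, List.getElem?_append_right (by omega : p.length ≤ i),
      h1]

-- min? of a nonempty list of equal values
theorem min?_const (l : List Nat) (M : Nat) (hne : l ≠ []) (h : ∀ a ∈ l, a = M) :
    l.min? = some M := by
  rcases l with _ | ⟨a, l⟩
  · exact absurd rfl hne
  · have ha : a = M := h a (by simp)
    rw [List.min?_eq_some_iff]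
    exact ⟨by simp [ha], fun b hb => by rw [h b hb]⟩

theorem transpose_and_fill_spec : Claim_equal_transpose_and_fill := by
  intro fp _ hpre
  rcases hpre with ⟨hne, hall⟩
  unfold Spec_transpose_and_fill transpose_and_fill transpose_and_fill_alt pyZipStar
  set M := ((fp.map List.length).max?).getD 0 with hM
  set ext := fp.map (fun path =>
    path ++ List.replicate (M - path.length) ((PySem.List.pyGet? path (-1)).getD 0)) with hext
  have hlens : ∀ a ∈ ext.map List.length, a = M := by
    intro a ha
    rcases List.mem_map.mp ha with ⟨r, hr, rfl⟩
    rcases List.mem_map.mp hr with ⟨p, hp, rfl⟩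
    exact ext_len p M (len_le_maxLen fp p hp) _
  have hmin : (ext.map List.length).min? = some M :=
    min?_const _ M (by simp [hext, hne]) hlens
  show (List.range (((ext.map List.length).min?).getD 0)).map
      (fun i => ext.map (fun r => r.getD i 0)) =
    (List.range M).map (fun i => fp.map (fun p =>
      if i < p.length then p.getD i 0 else (PySem.List.pyGet? p (-1)).getD 0))
  rw [hmin]
  simp only [Option.getD_some]
  apply List.map_congr_left
  intro i hi
  have hiM : i < M := List.mem_range.mp hi
  rw [hext, List.map_map]
  apply List.map_congr_left
  intro p hp
  simp only [Function.comp]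
  rw [ext_getD p M i (len_le_maxLen fp p hp) hiM]
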